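-- pv_equiv track=rewrite | github.com/joshanashakya/dissertation | workspace/dataset/java-python/GeeksForGeeks/3751/A/2.py | getDistinctPoints
-- ===== SOURCE A (Python) =====
-- def countDistinct(arr, Len):
--
--     hs = dict()
--
--     for i in range(Len):
--
--         # add all the elements to the HashSet
--         hs[arr[i]] = 1
--
--     # Return the size of hashset as
--     # it consists of all unique elements
--     return len(hs)
--
-- def getDistinctPoints(current_pos, path):
--
--     # Length of path
--     Len = len(path)
--
--     # Array to store all the points traveled
--     points = [0 for i in range(Len + 1)]
--
--     # The first pois the current_pos
--     points[0] = current_pos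
--
--     # For all the directions in path
--     for i in range(Len):
--
--         # Get whether the direction
--         # was left or right
--         ch = path[i]
--
--         # If the direction is left
--         if (ch == '0'):
--
--             # Decrement the current position by 1
--             current_pos -= 1
--
--             # Store the current position in array
--             points[i + 1] = current_pos
--
--         # If the direction is right
--         else:
--
--             # Increment the current position by 1
--             current_pos += 1
--
--             # Store the current position in array
--             points[i + 1] = current_pos
--
--     return countDistinct(points, Len + 1)
-- ===== SOURCE B (Python) =====
-- def getDistinctPoints(current_pos, path):
--     # A +/-1 walk visits a contiguous range: distinct points = max - min + 1.
--     lo = hi = current_pos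
--     for ch in path:
--         if ch == '0':
--             current_pos -= 1
--         else:
--             current_pos += 1
--         if current_pos < lo:
--             lo = current_pos
--         if current_pos > hi:
--             hi = current_pos
--     return hi - lo + 1
-- ===== Notes on version B (the rewrite author's own statement) =====
-- stated objective: simpler
-- what changed: B drops the points array and the hash-set count entirely: since a +/-1 walk visits a contiguous range, it tracks only the running position and its min/max and returns max - min + 1 in closed form.
import Mathlib
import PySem

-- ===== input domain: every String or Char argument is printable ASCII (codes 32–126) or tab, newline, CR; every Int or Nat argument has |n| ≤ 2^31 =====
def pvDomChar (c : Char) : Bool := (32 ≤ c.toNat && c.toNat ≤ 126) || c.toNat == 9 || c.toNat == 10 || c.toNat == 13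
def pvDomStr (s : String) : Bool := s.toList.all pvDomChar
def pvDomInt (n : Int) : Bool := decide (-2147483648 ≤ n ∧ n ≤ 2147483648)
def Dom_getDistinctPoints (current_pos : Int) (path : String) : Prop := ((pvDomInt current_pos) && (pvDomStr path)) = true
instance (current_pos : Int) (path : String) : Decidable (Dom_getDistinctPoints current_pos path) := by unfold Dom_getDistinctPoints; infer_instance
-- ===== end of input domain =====

-- B drops the points array and the dict-based distinct count: a ±1 walk visits a
-- contiguous range, so B tracks only min/max of the running position (simpler, O(1) space).

-- ===== PORT A =====
-- countDistinct(arr, Len): insert every element into a dict, return its size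
def countDistinctA (arr : List Int) : Int :=
  let hs := arr.foldl (fun (d : PySem.Dict Int Int) x => d.insert x 1) PySem.Dict.empty
  (PySem.Dict.size hs : Int)

-- the loop filling points[1..Len]: each step stores the new current position
def walkA (current_pos : Int) (cs : List Char) : List Int :=
  match cs with
  | [] => []
  | c :: rest =>
    if c = '0' then
      (current_pos - 1) :: walkA (current_pos - 1) rest
    else
      (current_pos + 1) :: walkA (current_pos + 1) rest

def getDistinctPoints (current_pos : Int) (path : String) : Int :=
  -- points[0] = current_pos, points[i+1] = position after i+1 steps
  let points : List Int := current_pos :: walkA current_pos path.toList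
  countDistinctA points

-- ===== PORT B =====
-- fold state: (current_pos, lo, hi)
def stepB (s : Int × Int × Int) (c : Char) : Int × Int × Int :=
  let p := if c = '0' then s.1 - 1 else s.1 + 1
  (p, if p < s.2.1 then p else s.2.1, if s.2.2 < p then p else s.2.2)

def getDistinctPoints_alt (current_pos : Int) (path : String) : Int :=
  let s := path.toList.foldl stepB (current_pos, current_pos, current_pos)
  s.2.2 - s.2.1 + 1

-- ===== PRECONDITION & SPEC =====
def Spec_getDistinctPoints (current_pos : Int) (path : String) (out : Int) : Prop := out = getDistinctPoints_alt current_pos path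
instance (current_pos : Int) (path : String) (out : Int) : Decidable (Spec_getDistinctPoints current_pos path out) := by unfold Spec_getDistinctPoints; infer_instance

-- ===== CLAIM (what is proved, stated in full; the proofs are below) =====
def Claim_equal_getDistinctPoints : Prop := ∀ (current_pos : Int) (path : String), Dom_getDistinctPoints current_pos path → Spec_getDistinctPoints current_pos path (getDistinctPoints current_pos path)

-- ===== LEMMAS AND PROOFS =====

-- A's dict size is the length of Python-dedup of the inserted list
theorem countDistinctA_eq_dedup (arr : List Int) :
    countDistinctA arr = ((PySem.List.dedup arr).length : Int) := by
  unfold countDistinctA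
  have hk := PySem.Dict.keys_foldl_insert arr (fun _ _ => (1 : Int)) PySem.Dict.empty
  simp only [PySem.Dict.size, PySem.Dict.keys] at *
  have : ((arr.foldl (fun (d : PySem.Dict Int Int) x => d.insert x 1) PySem.Dict.empty).items.map Prod.fst).length
      = (arr.foldl (fun (d : PySem.Dict Int Int) x => d.insert x 1) PySem.Dict.empty).items.length :=
    List.length_map _
  rw [← this, hk]
  simp [PySem.Set.update, PySem.List.dedup_eq_ofList, PySem.Set.ofList, PySem.Dict.empty]

-- the main invariant of B's fold: it computes the exact range of visited points
theorem foldB_inv (cs : List Char) (p lo hi : Int) (h1 : lo ≤ p) (h2 : p ≤ hi) :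
    let s := cs.foldl stepB (p, lo, hi)
    s.2.1 ≤ s.1 ∧ s.1 ≤ s.2.2 ∧ s.2.1 ≤ lo ∧ hi ≤ s.2.2 ∧
    (∀ x ∈ walkA p cs, s.2.1 ≤ x ∧ x ≤ s.2.2) ∧
    (∀ x, s.2.1 ≤ x → x ≤ s.2.2 → (lo ≤ x ∧ x ≤ hi) ∨ x ∈ walkA p cs) := by
  induction cs generalizing p lo hi with
  | nil =>
    simp [walkA]
    exact ⟨h1, h2, fun x hx hx' => ⟨hx, hx'⟩⟩
  | cons c rest ih =>
    simp only [List.foldl_cons]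
    set p₁ : Int := if c = '0' then p - 1 else p + 1 with hp₁
    have hstep : stepB (p, lo, hi) c
        = (p₁, if p₁ < lo then p₁ else lo, if hi < p₁ then p₁ else hi) := by
      simp [stepB, hp₁]
    rw [hstep]
    have hlo₁ : (if p₁ < lo then p₁ else lo) ≤ p₁ := by split <;> omega
    have hhi₁ : p₁ ≤ (if hi < p₁ then p₁ else hi) := by split <;> omega
    obtain ⟨i1, i2, i3, i4, i5, i6⟩ := ih p₁ _ _ hlo₁ hhi₁
    have hw : walkA p (c :: rest) = p₁ :: walkA p₁ rest := by
      by_cases h : c = '0' <;> simp [walkA, h, hp₁]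
    have hle_lo : (if p₁ < lo then p₁ else lo) ≤ lo := by split <;> omega
    have hle_hi : hi ≤ (if hi < p₁ then p₁ else hi) := by split <;> omega
    have hp' : p₁ = p - 1 ∨ p₁ = p + 1 := by by_cases hc : c = '0' <;> simp [hp₁, hc]
    refine ⟨i1, i2, by omega, by omega, ?_, ?_⟩
    · intro x hx
      rw [hw] at hx
      rcases List.mem_cons.mp hx with rfl | hx
      · exact ⟨by omega, by omega⟩
      · exact i5 x hx
    · intro x hxl hxr
      rcases i6 x hxl hxr with ⟨ha, hb⟩ | hmem
      · have hx : x = p₁ ∨ (lo ≤ x ∧ x ≤ hi) := by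
          rcases hp' with hp' | hp' <;> split_ifs at ha hb <;> omega
        rcases hx with rfl | hx
        · right; rw [hw]; exact List.mem_cons_self ..
        · left; exact hx
      · right; rw [hw]; exact List.mem_cons_of_mem _ hmem

-- ===== VERDICT (by name: the statement is the Claim_ definition above) =====
theorem getDistinctPoints_spec : Claim_equal_getDistinctPoints := by
  intro pos path _
  unfold Spec_getDistinctPoints getDistinctPoints getDistinctPoints_alt
  simp only
  set cs := path.toList with hcs
  obtain ⟨i1, i2, i3, i4, i5, i6⟩ := foldB_inv cs pos pos pos le_rfl le_rfl
  set s := cs.foldl stepB (pos, pos, pos) with hs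
  set l : List Int := pos :: walkA pos cs with hl
  have hmem : ∀ x : Int, x ∈ l ↔ s.2.1 ≤ x ∧ x ≤ s.2.2 := by
    intro x
    constructor
    · intro hx
      rcases List.mem_cons.mp hx with rfl | hx
      · exact ⟨by omega, by omega⟩
      · exact i5 x hx
    · intro ⟨hxl, hxr⟩
      rcases i6 x hxl hxr with ⟨ha, hb⟩ | hmem
      · have : x = pos := by omega
        subst this; exact List.mem_cons_self ..
      · exact List.mem_cons_of_mem _ hmem
  rw [countDistinctA_eq_dedup]
  have hnd : (PySem.List.dedup l).Nodup := PySem.List.nodup_dedup l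
  have hfin : (PySem.List.dedup l).toFinset = Finset.Icc s.2.1 s.2.2 := by
    ext x
    simp [hmem x, Finset.mem_Icc]
  have hcard : (PySem.List.dedup l).length = (Finset.Icc s.2.1 s.2.2).card := by
    rw [← hfin, List.toFinset_card_of_nodup hnd]
  rw [hcard, Int.card_Icc]
  have hlohi : s.2.1 ≤ s.2.2 := by omega
  omega
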